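-- pv_equiv track=rewrite | github.com/SL313/practice-Algorithm | Programmers/Level1/모의고사.py | solution
-- ===== SOURCE A (Python) =====
-- def solution(answers):
--     answer = []
--     student1 = [1,2,3,4,5]
--     student2 = [2,1,2,3,2,4,2,5]
--     student3 = [3,3,1,1,2,2,4,4,5,5]
--     check1=0
--     check2=0
--     check3=0
--     max=0
--     for i in range(len(answers)):
--         if answers[i]==student1[i%5]:
--             check1+=1
--             if(max<check1):
--                 max=check1
--         if answers[i]==student2[i%8]:
--             check2+=1
--             if(max<check2):
--                 max=check2
--         if answers[i]==student3[i%10]: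
--             check3+=1
--             if(max<check3):
--                 max=check3
--     if max==check1:
--         answer.append(1)
--     if max==check2:
--         answer.append(2)
--     if max==check3:
--         answer.append(3)
--     return answer
-- ===== SOURCE B (Python) =====
-- def solution(answers):
--     # Histogram approach: one pass bins answers by (position mod 40, value)
--     # (40 = lcm of the three pattern lengths); each student's score is then
--     # a 40-term lookup sum over the histogram, independent of the input length.
--     hist = {}
--     for i, a in enumerate(answers):
--         key = (i % 40, a)
--         hist[key] = hist.get(key, 0) + 1
--     patterns = [[1, 2, 3, 4, 5], [2, 1, 2, 3, 2, 4, 2, 5], [3, 3, 1, 1, 2, 2, 4, 4, 5, 5]]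
--     scores = [sum(hist.get((r, p[r % len(p)]), 0) for r in range(40)) for p in patterns]
--     m = max(scores)
--     return [k for k in (1, 2, 3) if scores[k - 1] == m]
-- ===== Notes on version B (the rewrite author's own statement) =====
-- stated objective: alternative
-- what changed: Replaces A's per-element matching loop with three interleaved counters and a running maximum by a group-then-aggregate algorithm: one pass builds a histogram keyed by (index mod 40, answer) (40 = lcm of the pattern lengths), each score is then a 40-term histogram-lookup sum, and winners are selected by comparing scores to max(scores).
import Mathlib
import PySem

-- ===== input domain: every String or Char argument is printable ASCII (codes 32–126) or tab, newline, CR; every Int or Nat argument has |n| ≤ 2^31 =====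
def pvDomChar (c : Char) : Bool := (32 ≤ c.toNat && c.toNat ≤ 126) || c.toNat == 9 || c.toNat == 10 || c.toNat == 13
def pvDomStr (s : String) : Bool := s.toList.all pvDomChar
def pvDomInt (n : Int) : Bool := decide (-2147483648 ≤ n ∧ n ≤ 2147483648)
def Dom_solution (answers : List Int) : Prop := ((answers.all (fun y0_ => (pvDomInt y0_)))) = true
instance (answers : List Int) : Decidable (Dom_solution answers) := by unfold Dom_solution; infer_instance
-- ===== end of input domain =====

-- B replaces A's interleaved counters-with-running-max loop by a group-then-aggregate
-- algorithm: a histogram keyed by (index mod 40, answer), scores as 40-term lookup sums,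
-- then select-the-max (objective: alternative).

-- ===== PORT A =====
-- body of A's "for i in range(len(answers))" loop: state (check1, check2, check3, max),
-- the three counters and the running max updated in A's order (every index i and i%k
-- is in range, so pyGetD is exactly Python's indexing here)
def solutionStep (answers : List Int) (st : Int × Int × Int × Int) (i : Int) : Int × Int × Int × Int :=
  let c1 := st.1; let c2 := st.2.1; let c3 := st.2.2.1; let m := st.2.2.2
  let p1 := if PySem.List.pyGetD answers i 0 = PySem.List.pyGetD ([1,2,3,4,5] : List Int) (PySem.Int.mod i 5) 0 then
      (c1 + 1, if m < c1 + 1 then c1 + 1 else m) else (c1, m)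
  let c1 := p1.1; let m := p1.2
  let p2 := if PySem.List.pyGetD answers i 0 = PySem.List.pyGetD ([2,1,2,3,2,4,2,5] : List Int) (PySem.Int.mod i 8) 0 then
      (c2 + 1, if m < c2 + 1 then c2 + 1 else m) else (c2, m)
  let c2 := p2.1; let m := p2.2
  let p3 := if PySem.List.pyGetD answers i 0 = PySem.List.pyGetD ([3,3,1,1,2,2,4,4,5,5] : List Int) (PySem.Int.mod i 10) 0 then
      (c3 + 1, if m < c3 + 1 then c3 + 1 else m) else (c3, m)
  let c3 := p3.1; let m := p3.2
  (c1, c2, c3, m)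

def solution (answers : List Int) : List Int :=
  let st := (PySem.List.pyRange 0 (PySem.List.len answers) 1).foldl (solutionStep answers) (0, 0, 0, 0)
  let c1 := st.1; let c2 := st.2.1; let c3 := st.2.2.1; let m := st.2.2.2
  (if m = c1 then [1] else []) ++ (if m = c2 then [2] else []) ++ (if m = c3 then [3] else [])

-- ===== PORT B =====
-- hist[key] = hist.get(key, 0) + 1 over key = (i % 40, a) for i, a in enumerate(answers)
def pvHist (answers : List Int) : PySem.Dict (Int × Int) Int :=
  (PySem.List.enumerate answers).foldl
    (fun d ia =>
      let key := (PySem.Int.mod ia.1 40, ia.2)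
      d.insert key (d.getD key 0 + 1))
    PySem.Dict.empty

-- sum(hist.get((r, p[r % len(p)]), 0) for r in range(40))
def pvHistScore (hist : PySem.Dict (Int × Int) Int) (p : List Int) : Int :=
  (PySem.List.pyRange 0 40 1).foldl
    (fun s r => s + hist.getD (r, PySem.List.pyGetD p (PySem.Int.mod r (PySem.List.len p)) 0) 0) 0

def solution_alt (answers : List Int) : List Int :=
  let hist := pvHist answers
  let patterns : List (List Int) :=
    [[1, 2, 3, 4, 5], [2, 1, 2, 3, 2, 4, 2, 5], [3, 3, 1, 1, 2, 2, 4, 4, 5, 5]]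
  let scores := patterns.map (pvHistScore hist)
  let m := (PySem.List.max? scores (fun x => x)).getD 0   -- max(scores); scores is nonempty
  ([1, 2, 3] : List Int).filter (fun k => PySem.List.pyGetD scores (k - 1) 0 == m)

-- ===== PRECONDITION & SPEC =====
def Spec_solution (answers : List Int) (out : List Int) : Prop := out = solution_alt answers
instance (answers : List Int) (out : List Int) : Decidable (Spec_solution answers out) := by unfold Spec_solution; infer_instance

-- ===== CLAIM (what is proved, stated in full; the proofs are below) =====
def Claim_equal_solution : Prop := ∀ (answers : List Int), Dom_solution answers → Spec_solution answers (solution answers)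

-- ===== LEMMAS AND PROOFS =====

-- per-pattern count over the first n indices (proof-only helper)
def pvCnt (p : List Int) (L : Int) (answers : List Int) (n : Nat) : Int :=
  (PySem.List.pyRange 0 (n : Int) 1).foldl
    (fun s i =>
      if PySem.List.pyGetD answers i 0 = PySem.List.pyGetD p (PySem.Int.mod i L) 0 then s + 1 else s) 0

lemma pvCnt_zero (p : List Int) (L : Int) (answers : List Int) : pvCnt p L answers 0 = 0 := by
  simp [pvCnt]

lemma pvCnt_succ (p : List Int) (L : Int) (answers : List Int) (n : Nat) :
    pvCnt p L answers (n + 1) =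
      if PySem.List.pyGetD answers (n : Int) 0 = PySem.List.pyGetD p (PySem.Int.mod (n : Int) L) 0
      then pvCnt p L answers n + 1 else pvCnt p L answers n := by
  unfold pvCnt
  rw [show ((n + 1 : Nat) : Int) = (n : Int) + 1 by push_cast; ring,
      PySem.List.pyRange_one_succ_right (by positivity), List.foldl_append]
  simp

set_option maxHeartbeats 1000000 in
lemma pvFold_main (answers : List Int) (n : Nat) :
    (PySem.List.pyRange 0 (n : Int) 1).foldl (solutionStep answers) (0, 0, 0, 0) =
    (pvCnt [1,2,3,4,5] 5 answers n, pvCnt [2,1,2,3,2,4,2,5] 8 answers n,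
     pvCnt [3,3,1,1,2,2,4,4,5,5] 10 answers n,
     max (max (pvCnt [1,2,3,4,5] 5 answers n) (pvCnt [2,1,2,3,2,4,2,5] 8 answers n))
         (pvCnt [3,3,1,1,2,2,4,4,5,5] 10 answers n)) := by
  induction n with
  | zero => simp [pvCnt_zero]
  | succ n ih =>
    rw [show ((n + 1 : Nat) : Int) = (n : Int) + 1 by push_cast; ring,
        PySem.List.pyRange_one_succ_right (by positivity), List.foldl_append, ih,
        pvCnt_succ, pvCnt_succ, pvCnt_succ]
    simp only [List.foldl_cons, List.foldl_nil, solutionStep]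
    split_ifs <;> simp_all <;> omega

-- the histogram lookup is a count of keys in the mapped key list
lemma pvHist_getD (answers : List Int) (k : Int × Int) :
    (pvHist answers).getD k 0 =
      ((PySem.List.enumerate answers).map (fun ia => (PySem.Int.mod ia.1 40, ia.2))).count k := by
  have h : pvHist answers =
      ((PySem.List.enumerate answers).map (fun ia => (PySem.Int.mod ia.1 40, ia.2))).foldl
        (fun d x => d.insert x (d.getD x 0 + 1)) PySem.Dict.empty := by
    unfold pvHist; rw [List.foldl_map]
  rw [h, PySem.Dict.getD_foldl_insert_add_one]
  simp

-- picking the single matching residue out of a Nodup list (specific to B's 40-bucket sum)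
lemma pvSum_single (R : List Int) (hnd : R.Nodup) (v : Int) (hv : v ∈ R) (c : Int → Int)
    (hz : ∀ r ∈ R, r ≠ v → c r = 0) : (R.map c).sum = c v := by
  induction R with
  | nil => cases hv
  | cons r t ih =>
    rcases List.nodup_cons.mp hnd with ⟨hrt, hndt⟩
    rcases List.mem_cons.mp hv with h | h
    · subst h
      have hz' : (t.map c).sum = 0 := by
        apply List.sum_eq_zero
        intro x hx
        rcases List.mem_map.mp hx with ⟨r', hr', rfl⟩
        exact hz r' (List.mem_cons_of_mem _ hr') (fun e => hrt (e ▸ hr'))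
      simp [hz']
    · have hr : c r = 0 := hz r List.mem_cons_self (fun e => hrt (e ▸ h))
      rw [List.map_cons, List.sum_cons, hr,
          ih hndt h (fun x hx hne => hz x (List.mem_cons_of_mem _ hx) hne)]
      ring

-- for L ∣ 40, reducing mod 40 first does not change a residue mod L
lemma pvModMod (j L : Int) (h0 : 0 < L) (hd : L ∣ 40) :
    PySem.Int.mod (PySem.Int.mod j 40) L = PySem.Int.mod j L := by
  rw [PySem.Int.mod_eq_emod_of_pos (show (0:Int) < 40 by norm_num),
      PySem.Int.mod_eq_emod_of_pos h0, PySem.Int.mod_eq_emod_of_pos h0,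
      Int.emod_emod_of_dvd _ hd]

-- summing the 40 per-residue bucket counts over any index list recovers the direct count
lemma pvSum_count (I : List Int) (f q : Int → Int) :
    ((PySem.List.pyRange 0 40 1).map
        (fun r => (I.countP (fun j => (PySem.Int.mod j 40, f j) == (r, q r)) : Int))).sum =
      (I.countP (fun j => f j == q (PySem.Int.mod j 40)) : Int) := by
  induction I with
  | nil => simp
  | cons j t ih =>
    have hsplit : ∀ r : Int,
        (((j :: t).countP (fun j => (PySem.Int.mod j 40, f j) == (r, q r)) : Nat) : Int) =
          (t.countP (fun j => (PySem.Int.mod j 40, f j) == (r, q r)) : Int) +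
          (if (PySem.Int.mod j 40, f j) == (r, q r) then 1 else 0) := by
      intro r
      rw [List.countP_cons]
      split_ifs <;> simp_all
    calc ((PySem.List.pyRange 0 40 1).map
            (fun r => ((j :: t).countP (fun j => (PySem.Int.mod j 40, f j) == (r, q r)) : Int))).sum
        = ((PySem.List.pyRange 0 40 1).map
            (fun r => (t.countP (fun j => (PySem.Int.mod j 40, f j) == (r, q r)) : Int) +
              (if (PySem.Int.mod j 40, f j) == (r, q r) then 1 else 0))).sum := by
          exact congrArg List.sum (List.map_congr_left (fun r _ => hsplit r))
      _ = ((PySem.List.pyRange 0 40 1).map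
            (fun r => (t.countP (fun j => (PySem.Int.mod j 40, f j) == (r, q r)) : Int))).sum +
          ((PySem.List.pyRange 0 40 1).map
            (fun r => if (PySem.Int.mod j 40, f j) == (r, q r) then (1:Int) else 0)).sum := by
          rw [PySem.List.sum_map_add_int]
      _ = ((j :: t).countP (fun j => f j == q (PySem.Int.mod j 40)) : Int) := by
          rw [ih, pvSum_single (PySem.List.pyRange 0 40 1) (by decide) (PySem.Int.mod j 40)
              (by rw [PySem.List.mem_pyRange_one]
                  have h1 := PySem.Int.mod_nonneg j (show (0:Int) < 40 by norm_num)
                  have h2 := PySem.Int.mod_lt j (show (0:Int) < 40 by norm_num)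
                  omega)
              _
              (by intro r _ hne
                  have hb : ((PySem.Int.mod j 40, f j) == (r, q r)) = false := by
                    apply beq_false_of_ne
                    intro h
                    exact hne (congrArg Prod.fst h).symm
                  rw [hb]; simp)]
          rw [List.countP_cons]
          have : ((PySem.Int.mod j 40, f j) == (PySem.Int.mod j 40, q (PySem.Int.mod j 40))) =
              (f j == q (PySem.Int.mod j 40)) := by
            by_cases h : f j = q (PySem.Int.mod j 40) <;> simp [h]
          rw [this]
          split_ifs <;> simp_all

-- B's 40-bucket histogram sum for pattern p of length L (L ∣ 40) equals A's direct count
lemma pvHistScore_eq (p : List Int) (L : Int) (hL : PySem.List.len p = L) (h0 : 0 < L)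
    (hdvd : L ∣ 40) (answers : List Int) :
    pvHistScore (pvHist answers) p = pvCnt p L answers answers.length := by
  unfold pvHistScore
  rw [PySem.List.foldl_add
      (g := fun r => (pvHist answers).getD (r, PySem.List.pyGetD p (PySem.Int.mod r (PySem.List.len p)) 0) 0)]
  simp only [hL, pvHist_getD, zero_add]
  rw [PySem.List.enumerate_eq_map_pyRange (d := 0), List.map_map]
  unfold pvCnt
  rw [PySem.List.foldl_ite_add_one
    (p := fun i => PySem.List.pyGetD answers i 0 = PySem.List.pyGetD p (PySem.Int.mod i L) 0), zero_add]
  have hcnt : ∀ r : Int,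
      (((PySem.List.pyRange 0 (answers.length : Int) 1).map
          ((fun ia : Int × Int => (PySem.Int.mod ia.1 40, ia.2)) ∘
            fun j => (j, PySem.List.pyGetD answers j 0))).count
        (r, PySem.List.pyGetD p (PySem.Int.mod r L) 0) : Int) =
      ((PySem.List.pyRange 0 (answers.length : Int) 1).countP
        (fun j => (PySem.Int.mod j 40, PySem.List.pyGetD answers j 0) ==
          (r, PySem.List.pyGetD p (PySem.Int.mod r L) 0)) : Int) := by
    intro r
    rw [List.count_eq_countP, List.countP_map]
    rfl
  calc ((PySem.List.pyRange 0 40 1).map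
          (fun r => (((PySem.List.pyRange 0 (answers.length : Int) 1).map
              ((fun ia : Int × Int => (PySem.Int.mod ia.1 40, ia.2)) ∘
                fun j => (j, PySem.List.pyGetD answers j 0))).count
            (r, PySem.List.pyGetD p (PySem.Int.mod r L) 0) : Int))).sum
      = ((PySem.List.pyRange 0 40 1).map
          (fun r => ((PySem.List.pyRange 0 (answers.length : Int) 1).countP
            (fun j => (PySem.Int.mod j 40, PySem.List.pyGetD answers j 0) ==
              (r, PySem.List.pyGetD p (PySem.Int.mod r L) 0)) : Int))).sum := by
        exact congrArg List.sum (List.map_congr_left (fun r _ => hcnt r))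
    _ = ((PySem.List.pyRange 0 (answers.length : Int) 1).countP
          (fun j => PySem.List.pyGetD answers j 0 ==
            PySem.List.pyGetD p (PySem.Int.mod (PySem.Int.mod j 40) L) 0) : Int) := by
        exact pvSum_count _ _ (fun r => PySem.List.pyGetD p (PySem.Int.mod r L) 0)
    _ = ((PySem.List.pyRange 0 (answers.length : Int) 1).countP
          (fun j => decide (PySem.List.pyGetD answers j 0 =
            PySem.List.pyGetD p (PySem.Int.mod j L) 0)) : Int) := by
        congr 1
        apply List.countP_congr
        intro j _
        rw [pvModMod j L h0 hdvd]
        simp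

-- xs[k-1] on the three-element scores list, for k = 1, 2, 3
lemma pvG0 (a b c : Int) : PySem.List.pyGetD [a, b, c] (1 - 1) 0 = a := by
  norm_num [PySem.List.pyGetD, PySem.List.pyIdx?]
lemma pvG1 (a b c : Int) : PySem.List.pyGetD [a, b, c] (2 - 1) 0 = b := by
  norm_num [PySem.List.pyGetD, PySem.List.pyIdx?]
lemma pvG2 (a b c : Int) : PySem.List.pyGetD [a, b, c] (3 - 1) 0 = c := by
  norm_num [PySem.List.pyGetD, PySem.List.pyIdx?]
  rfl

-- A's three membership tests against the running max agree with B's filter against max(scores)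
set_option maxHeartbeats 1000000 in
lemma pvSelect (a b c : Int) :
    (if max (max a b) c = a then ([1] : List Int) else []) ++
      (if max (max a b) c = b then [2] else []) ++
      (if max (max a b) c = c then [3] else []) =
    ([1, 2, 3] : List Int).filter
      (fun k => PySem.List.pyGetD [a, b, c] (k - 1) 0 == (PySem.List.max? [a, b, c] (fun x => x)).getD 0) := by
  rw [PySem.List.max?_id_cons]
  simp only [List.foldl, Option.getD_some]
  simp only [List.filter_cons, List.filter_nil, pvG0, pvG1, pvG2, beq_iff_eq]
  split_ifs <;> first | rfl | (exfalso; omega)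

-- ===== VERDICT (by name: the statement is the Claim_ definition above) =====
theorem solution_spec : Claim_equal_solution := by
  intro answers _
  show solution answers = solution_alt answers
  unfold solution solution_alt
  simp only [PySem.List.len_eq, pvFold_main]
  rw [List.map_cons, List.map_cons, List.map_cons, List.map_nil,
      pvHistScore_eq _ 5 rfl (by norm_num) (by norm_num),
      pvHistScore_eq _ 8 rfl (by norm_num) (by norm_num),
      pvHistScore_eq _ 10 rfl (by norm_num) (by norm_num)]
  exact pvSelect _ _ _
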